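-- pv_equiv track=rewrite | github.com/menloresearch/verifiers-deepresearch | test.py | find_prefix_subsequence
-- ===== SOURCE A (Python) =====
-- def find_prefix_subsequence(a: str, b: str) -> str:
--     """
--     Removes the minimum number of characters from string 'a' so that
--     it becomes a prefix of string 'b'.
--     """
--     i = 0  # Pointer for string a
--     j = 0  # Pointer for string b
--     result = []
--
--     # Loop while we have characters left in both strings
--     while i < len(a) and j < len(b):
--         # If characters match, keep it and advance both pointers
--         if a[i] == b[j]:
--             result.append(a[i])
--             j += 1
--
--         # Always advance the pointer for 'a'
--         i += 1
--
--     return "".join(result)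
-- ===== SOURCE B (Python) =====
-- def find_prefix_subsequence(a: str, b: str) -> str:
--     """
--     Removes the minimum number of characters from string 'a' so that
--     it becomes a prefix of string 'b'.
--     """
--     result = []
--     rest = a
--     for ch in b:
--         idx = rest.find(ch)
--         if idx == -1:
--             break
--         result.append(ch)
--         rest = rest[idx + 1:]
--     return "".join(result)
-- ===== Notes on version B (the rewrite author's own statement) =====
-- stated objective: idiomatic
-- what changed: The outer loop now iterates over b's characters, using library substring search (str.find) on the remaining suffix of a instead of a manual char-by-char two-pointer scan of a.
import Mathlib
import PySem

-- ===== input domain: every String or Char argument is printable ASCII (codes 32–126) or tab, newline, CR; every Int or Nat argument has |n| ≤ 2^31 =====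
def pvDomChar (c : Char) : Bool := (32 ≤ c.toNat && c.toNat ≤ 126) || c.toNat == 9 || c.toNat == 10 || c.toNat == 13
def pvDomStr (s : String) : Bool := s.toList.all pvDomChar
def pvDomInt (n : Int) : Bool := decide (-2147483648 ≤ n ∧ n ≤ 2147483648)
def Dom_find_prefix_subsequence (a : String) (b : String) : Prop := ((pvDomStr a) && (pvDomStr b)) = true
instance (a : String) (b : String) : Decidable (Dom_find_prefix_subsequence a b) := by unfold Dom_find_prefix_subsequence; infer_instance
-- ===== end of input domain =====

-- B iterates over b's characters with library search (str.find) on the remaining suffix of a,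
-- instead of A's manual char-by-char two-pointer scan of a; same result, idiomatic decomposition.

-- ===== PORT A =====
-- the while loop: i advances every iteration (recursion on a's chars), j advances on a match
def pvGoA : List Char → List Char → List Char
  | [], _ => []
  | _ :: _, [] => []
  | c :: as_, d :: bs => if c = d then c :: pvGoA as_ bs else pvGoA as_ (d :: bs)

def find_prefix_subsequence (a : String) (b : String) : String :=
  String.ofList (pvGoA a.toList b.toList)

-- ===== PORT B =====
-- for ch in b: idx = rest.find(ch) (none = -1, break); result.append(ch); rest = rest[idx+1:]
def pvGoB : List Char → List Char → List Char
  | [], _ => []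
  | d :: bs, rest =>
    match rest.findIdx? (· = d) with
    | none => []
    | some idx => d :: pvGoB bs (rest.drop (idx + 1))

def find_prefix_subsequence_alt (a : String) (b : String) : String :=
  String.ofList (pvGoB b.toList a.toList)

-- ===== PRECONDITION & SPEC =====
def Spec_find_prefix_subsequence (a : String) (b : String) (out : String) : Prop := out = find_prefix_subsequence_alt a b
instance (a : String) (b : String) (out : String) : Decidable (Spec_find_prefix_subsequence a b out) := by unfold Spec_find_prefix_subsequence; infer_instance

-- ===== CLAIM (what is proved, stated in full; the proofs are below) =====
def Claim_equal_find_prefix_subsequence : Prop := ∀ (a : String) (b : String), Dom_find_prefix_subsequence a b → Spec_find_prefix_subsequence a b (find_prefix_subsequence a b)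

-- ===== LEMMAS AND PROOFS =====

theorem pvGoB_nil (bs : List Char) : pvGoB bs [] = [] := by
  cases bs <;> rfl

-- skipping a non-matching head of the a-suffix does not change B's result
theorem pvGoB_skip (d c : Char) (bs as_ : List Char) (h : ¬ c = d) :
    pvGoB (d :: bs) (c :: as_) = pvGoB (d :: bs) as_ := by
  simp only [pvGoB, List.findIdx?_cons]
  have hc : (c = d) = False := by simp [h]
  simp only [hc, decide_false]
  cases hfind : as_.findIdx? (· = d) with
  | none => simp
  | some i => simp [List.drop_succ_cons]

theorem pvGoA_eq_pvGoB (as_ bs : List Char) : pvGoA as_ bs = pvGoB bs as_ := by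
  induction as_ generalizing bs with
  | nil => cases bs <;> simp [pvGoA, pvGoB_nil]
  | cons c as_ ih =>
    cases bs with
    | nil => simp [pvGoA, pvGoB]
    | cons d bs =>
      by_cases h : c = d
      · subst h
        simp [pvGoA, pvGoB, List.findIdx?_cons, ih]
      · rw [pvGoB_skip d c bs as_ h, ← ih (d :: bs)]
        simp [pvGoA, h]

-- ===== VERDICT (by name: the statement is the Claim_ definition above) =====
theorem find_prefix_subsequence_spec : Claim_equal_find_prefix_subsequence := by
  intro a b _
  unfold Spec_find_prefix_subsequence find_prefix_subsequence find_prefix_subsequence_alt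
  rw [pvGoA_eq_pvGoB]
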